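-- pv_equiv track=rewrite | github.com/WAF2p/pass | wafpass/carbon.py | _detect_primary_region
-- ===== SOURCE A (Python) =====
-- REGION_CARBON_INTENSITY: dict[str, float] = {
--     # AWS — Europe
--     "eu-central-1":   0.338,   # Germany (Frankfurt)
--     "eu-central-2":   0.029,   # Switzerland (Zurich) — mostly hydro
--     "eu-west-1":      0.316,   # Ireland (Dublin)
--     "eu-west-2":      0.233,   # UK (London)
--     "eu-west-3":      0.052,   # France (Paris) — nuclear-heavy
--     "eu-south-1":     0.233,   # Italy (Milan)
--     "eu-south-2":     0.165,   # Spain (Madrid)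
--     "eu-north-1":     0.008,   # Sweden (Stockholm) — hydro + nuclear
--     # AWS — North America
--     "us-east-1":      0.415,   # Virginia (N. Virginia)
--     "us-east-2":      0.410,   # Ohio (Columbus)
--     "us-west-1":      0.274,   # California (N. California)
--     "us-west-2":      0.136,   # Oregon (Portland) — hydro-heavy
--     "ca-central-1":   0.130,   # Canada (Montreal)
--     "ca-west-1":      0.016,   # Canada (Calgary)
--     # AWS — Asia Pacific
--     "ap-east-1":      0.710,   # Hong Kong
--     "ap-south-1":     0.708,   # India (Mumbai) — coal-heavy
--     "ap-south-2":     0.708,   # India (Hyderabad)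
--     "ap-southeast-1": 0.431,   # Singapore
--     "ap-southeast-2": 0.610,   # Australia (Sydney)
--     "ap-southeast-3": 0.760,   # Indonesia (Jakarta)
--     "ap-northeast-1": 0.453,   # Japan (Tokyo)
--     "ap-northeast-2": 0.415,   # South Korea (Seoul)
--     "ap-northeast-3": 0.453,   # Japan (Osaka)
--     # AWS — Middle East & Africa
--     "me-south-1":     0.700,   # Bahrain
--     "me-central-1":   0.700,   # UAE (Dubai)
--     "af-south-1":     0.900,   # South Africa (Cape Town)
--     # AWS — South America
--     "sa-east-1":      0.074,   # Brazil (São Paulo) — hydro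
--     # Azure — selected
--     "northeurope":    0.316,
--     "westeurope":     0.338,
--     "germanywestcentral": 0.338,
--     "francecentral":  0.052,
--     "uksouth":        0.233,
--     "swedencentral":  0.008,
--     "eastus":         0.415,
--     "westus2":        0.136,
--     "australiaeast":  0.610,
--     "southeastasia":  0.431,
--     # GCP — selected
--     "europe-west1":   0.052,   # Belgium — wind
--     "europe-west4":   0.338,   # Netherlands
--     "us-central1":    0.410,
--     "us-east1":       0.415,
--     "us-west1":       0.136,
--     "asia-east1":     0.710,   # Taiwan
--     "asia-southeast1": 0.431,
-- }
--
-- _PREFERRED_PROVIDERS = {"aws", "azurerm", "google", "azure"}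
--
-- def _detect_primary_region(detected_regions: list[tuple[str, str]]) -> str:
--     """Pick the most representative region from the detected list.
--
--     Each entry in *detected_regions* is a ``(region_name, provider)`` tuple
--     (the same format used by ``IaCPlugin.extract_regions()`` and stored on
--     :class:`Report.detected_regions <wafpass.models.Report>`).
--
--     Preference order:
--     1. First entry from a major provider (AWS / Azure / GCP) whose region is
--        present in the carbon intensity lookup table.
--     2. First entry from any provider that is in the lookup table.
--     3. First entry from a major provider (even if the region is unknown).
--     4. Fall back to the first entry's region string.
--     """
--     if not detected_regions:
--         return "eu-central-1"
--
--     # 1. Prefer major provider + known region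
--     for region, provider in detected_regions:
--         if provider.lower() in _PREFERRED_PROVIDERS and region in REGION_CARBON_INTENSITY:
--             return region
--
--     # 2. Any known region
--     for region, _provider in detected_regions:
--         if region in REGION_CARBON_INTENSITY:
--             return region
--
--     # 3. Major provider fallback
--     for region, provider in detected_regions:
--         if provider.lower() in _PREFERRED_PROVIDERS:
--             return region
--
--     return detected_regions[0][0]
-- ===== SOURCE B (Python) =====
-- REGION_CARBON_INTENSITY: dict[str, float] = {
--     "eu-central-1":   0.338,
--     "eu-central-2":   0.029,
--     "eu-west-1":      0.316,
--     "eu-west-2":      0.233,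
--     "eu-west-3":      0.052,
--     "eu-south-1":     0.233,
--     "eu-south-2":     0.165,
--     "eu-north-1":     0.008,
--     "us-east-1":      0.415,
--     "us-east-2":      0.410,
--     "us-west-1":      0.274,
--     "us-west-2":      0.136,
--     "ca-central-1":   0.130,
--     "ca-west-1":      0.016,
--     "ap-east-1":      0.710,
--     "ap-south-1":     0.708,
--     "ap-south-2":     0.708,
--     "ap-southeast-1": 0.431,
--     "ap-southeast-2": 0.610,
--     "ap-southeast-3": 0.760,
--     "ap-northeast-1": 0.453,
--     "ap-northeast-2": 0.415,
--     "ap-northeast-3": 0.453,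
--     "me-south-1":     0.700,
--     "me-central-1":   0.700,
--     "af-south-1":     0.900,
--     "sa-east-1":      0.074,
--     "northeurope":    0.316,
--     "westeurope":     0.338,
--     "germanywestcentral": 0.338,
--     "francecentral":  0.052,
--     "uksouth":        0.233,
--     "swedencentral":  0.008,
--     "eastus":         0.415,
--     "westus2":        0.136,
--     "australiaeast":  0.610,
--     "southeastasia":  0.431,
--     "europe-west1":   0.052,
--     "europe-west4":   0.338,
--     "us-central1":    0.410,
--     "us-east1":       0.415,
--     "us-west1":       0.136,
--     "asia-east1":     0.710,
--     "asia-southeast1": 0.431,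
-- }
--
-- _PREFERRED_PROVIDERS = {"aws", "azurerm", "google", "azure"}
--
--
-- def _detect_primary_region(detected_regions: list[tuple[str, str]]) -> str:
--     """Single pass: return immediately on the top tier, remember the first
--     hit of each lower tier, and pick the best remembered one at the end."""
--     if not detected_regions:
--         return "eu-central-1"
--     first_known = None
--     first_pref = None
--     for region, provider in detected_regions:
--         pref = provider.lower() in _PREFERRED_PROVIDERS
--         known = region in REGION_CARBON_INTENSITY
--         if pref and known:
--             return region
--         if known and first_known is None:
--             first_known = region
--         if pref and first_pref is None:
--             first_pref = region
--     if first_known is not None: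
--         return first_known
--     if first_pref is not None:
--         return first_pref
--     return detected_regions[0][0]
-- ===== Notes on version B (the rewrite author's own statement) =====
-- stated objective: alternative
-- what changed: Replaces A's three sequential full scans (one per preference tier) with a single pass that returns immediately on a top-tier hit and remembers the first hit of each lower tier.
import Mathlib
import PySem

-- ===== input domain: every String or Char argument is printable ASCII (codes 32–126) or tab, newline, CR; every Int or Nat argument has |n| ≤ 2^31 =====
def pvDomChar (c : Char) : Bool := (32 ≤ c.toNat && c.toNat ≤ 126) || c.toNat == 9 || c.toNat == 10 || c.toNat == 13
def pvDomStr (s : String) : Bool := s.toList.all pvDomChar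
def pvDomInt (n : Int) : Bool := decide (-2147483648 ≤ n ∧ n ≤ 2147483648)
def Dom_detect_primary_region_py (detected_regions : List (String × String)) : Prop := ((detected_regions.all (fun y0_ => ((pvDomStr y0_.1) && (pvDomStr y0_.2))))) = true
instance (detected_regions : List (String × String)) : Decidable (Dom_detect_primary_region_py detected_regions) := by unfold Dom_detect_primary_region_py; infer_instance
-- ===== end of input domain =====

-- B is a single pass with early return and first-hit memoisation, instead of A's three sequential scans; return values are proved equal.

-- module-level constants shared by both ports (the keys of REGION_CARBON_INTENSITY and _PREFERRED_PROVIDERS)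
def regionKeys : List String :=
  ["eu-central-1","eu-central-2","eu-west-1","eu-west-2","eu-west-3","eu-south-1","eu-south-2","eu-north-1",
   "us-east-1","us-east-2","us-west-1","us-west-2","ca-central-1","ca-west-1",
   "ap-east-1","ap-south-1","ap-south-2","ap-southeast-1","ap-southeast-2","ap-southeast-3",
   "ap-northeast-1","ap-northeast-2","ap-northeast-3","me-south-1","me-central-1","af-south-1","sa-east-1",
   "northeurope","westeurope","germanywestcentral","francecentral","uksouth","swedencentral","eastus","westus2",
   "australiaeast","southeastasia","europe-west1","europe-west4","us-central1","us-east1","us-west1",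
   "asia-east1","asia-southeast1"]

def preferredProviders : List String := ["aws", "azurerm", "google", "azure"]

-- provider.lower() in _PREFERRED_PROVIDERS
def isPref (provider : String) : Bool := preferredProviders.contains (PySem.Str.lower provider)
-- region in REGION_CARBON_INTENSITY
def isKnown (region : String) : Bool := regionKeys.contains region

-- ===== PORT A =====
-- loop 1: first major provider with known region
def loopA1 : List (String × String) → Option String
  | [] => none
  | (region, provider) :: t => if isPref provider && isKnown region then some region else loopA1 t

-- loop 2: first known region
def loopA2 : List (String × String) → Option String
  | [] => none
  | (region, _provider) :: t => if isKnown region then some region else loopA2 t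

-- loop 3: first major provider
def loopA3 : List (String × String) → Option String
  | [] => none
  | (region, provider) :: t => if isPref provider then some region else loopA3 t

def detect_primary_region_py (detected_regions : List (String × String)) : String :=
  match detected_regions with
  | [] => "eu-central-1"
  | (r0, _) :: _ =>
    match loopA1 detected_regions with
    | some r => r
    | none =>
      match loopA2 detected_regions with
      | some r => r
      | none =>
        match loopA3 detected_regions with
        | some r => r
        | none => r0   -- detected_regions[0][0]

-- ===== PORT B =====
-- single pass: early return on tier-1 hit, remember first tier-2 and tier-3 hits
def goB : List (String × String) → Option String → Option String → String → String
  | [], firstKnown, firstPref, fallback =>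
    match firstKnown with
    | some r => r
    | none =>
      match firstPref with
      | some r => r
      | none => fallback
  | (region, provider) :: t, firstKnown, firstPref, fallback =>
    let pref := isPref provider
    let known := isKnown region
    if pref && known then region
    else goB t (if known && firstKnown.isNone then some region else firstKnown)
               (if pref && firstPref.isNone then some region else firstPref) fallback

def detect_primary_region_py_alt (detected_regions : List (String × String)) : String :=
  match detected_regions with
  | [] => "eu-central-1"
  | (r0, _) :: _ => goB detected_regions none none r0

-- ===== PRECONDITION & SPEC =====
def Spec_detect_primary_region_py (detected_regions : List (String × String)) (out : String) : Prop := out = detect_primary_region_py_alt detected_regions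
instance (detected_regions : List (String × String)) (out : String) : Decidable (Spec_detect_primary_region_py detected_regions out) := by unfold Spec_detect_primary_region_py; infer_instance

-- ===== CLAIM (what is proved, stated in full; the proofs are below) =====
def Claim_equal_detect_primary_region_py : Prop := ∀ (detected_regions : List (String × String)), Dom_detect_primary_region_py detected_regions → Spec_detect_primary_region_py detected_regions (detect_primary_region_py detected_regions)

-- ===== LEMMAS AND PROOFS =====

-- the single pass computes tier-1 first match, else the remembered/scanned tier-2 first match, else tier-3, else fallback
lemma goB_eq (l : List (String × String)) (fk fp : Option String) (fb : String) :
    goB l fk fp fb =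
      match loopA1 l with
      | some r => r
      | none =>
        match fk.orElse (fun _ => loopA2 l) with
        | some r => r
        | none =>
          match fp.orElse (fun _ => loopA3 l) with
          | some r => r
          | none => fb := by
  induction l generalizing fk fp with
  | nil => cases fk <;> cases fp <;> simp [goB, loopA1, loopA2, loopA3, Option.orElse]
  | cons h t ih =>
    obtain ⟨region, provider⟩ := h
    by_cases hp : isPref provider = true <;> by_cases hk : isKnown region = true <;>
      cases fk <;> cases fp <;>
      simp [goB, loopA1, loopA2, loopA3, hp, hk, ih, Option.orElse, Option.isNone]

-- ===== VERDICT (by name: the statement is the Claim_ definition above) =====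
theorem detect_primary_region_py_spec : Claim_equal_detect_primary_region_py := by
  intro l _
  unfold Spec_detect_primary_region_py detect_primary_region_py detect_primary_region_py_alt
  cases l with
  | nil => rfl
  | cons h t =>
    obtain ⟨r0, p0⟩ := h
    simp only [goB_eq, Option.orElse]
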